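-- pv_equiv track=rewrite | github.com/jcockbain/ctci-solutions | chapter-17/Q07_baby_names.py | baby_names
-- ===== SOURCE A (Python) =====
-- class Name:
--     def __init__(self, name, count=0):
--         self.name = name
--         self.synonyms = []
--         self.count = count
--
-- def baby_names(names, synonyms):
--     graph = {}
--     for person in names:
--         name, count = person
--         graph[name] = Name(name, count)
--
--     for synonym in synonyms:
--         name_1, name_2 = synonym
--
--         if name_1 not in graph:
--             graph[name_1] = Name(name_1)
--         if name_2 not in graph:
--             graph[name_2] = Name(name_2)
--
--         graph[name_1].synonyms.append(graph[name_2])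
--         graph[name_2].synonyms.append(graph[name_1])
--
--     visited = set()
--     result = {}
--
--     def dfs(root):
--         if root in visited:
--             return 0
--         visited.add(root)
--         res = root.count
--         for node in root.synonyms:
--             res += dfs(node)
--         return res
--
--     for person in graph:
--         root = graph[person]
--         if root not in visited:
--             result[person] = dfs(root)
--
--     return [(name, result[name]) for name in result]
-- ===== SOURCE B (Python) =====
-- def baby_names(names, synonyms):
--     # union by relabeling: each known name carries a component label;
--     # every synonym pair merges the two labels by rewriting one of them.
--     counts = {}
--     for name, count in names:
--         counts[name] = count
--     label = {name: name for name in counts}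
--     for a, b in synonyms:
--         if a not in counts:
--             counts[a] = 0
--             label[a] = a
--         if b not in counts:
--             counts[b] = 0
--             label[b] = b
--         la, lb = label[a], label[b]
--         if la != lb:
--             for k in label:
--                 if label[k] == lb:
--                     label[k] = la
--     rep = {}
--     result = {}
--     for k in counts:
--         r = label[k]
--         if r not in rep:
--             rep[r] = k
--             result[k] = 0
--         result[rep[r]] += counts[k]
--     return list(result.items())
-- ===== Notes on version B (the rewrite author's own statement) =====
-- stated objective: alternative
-- what changed: Replaces the adjacency-list graph plus recursive DFS with a union-by-relabeling partition: a label map merged per synonym pair, then one grouping pass over the names in insertion order.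
import Mathlib
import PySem

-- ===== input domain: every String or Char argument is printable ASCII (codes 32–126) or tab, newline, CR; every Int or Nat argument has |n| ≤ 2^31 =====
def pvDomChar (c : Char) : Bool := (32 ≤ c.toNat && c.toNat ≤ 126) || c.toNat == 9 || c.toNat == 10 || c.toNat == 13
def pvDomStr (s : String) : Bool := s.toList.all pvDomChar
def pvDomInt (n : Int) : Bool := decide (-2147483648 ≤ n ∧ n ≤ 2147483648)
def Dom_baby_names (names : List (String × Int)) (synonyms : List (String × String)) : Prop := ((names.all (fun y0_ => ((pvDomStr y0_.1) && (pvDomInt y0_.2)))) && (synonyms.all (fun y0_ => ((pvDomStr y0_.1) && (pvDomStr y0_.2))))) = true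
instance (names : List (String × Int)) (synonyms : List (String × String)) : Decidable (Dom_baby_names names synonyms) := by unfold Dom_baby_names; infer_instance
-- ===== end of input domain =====

-- B replaces A's adjacency graph + recursive DFS by union-by-relabeling (a label map
-- merged per synonym pair, then one grouping pass); alternative algorithm, same results.


-- ===== PORT A =====
-- A's Name objects correspond one-to-one to graph keys (each object is stored at its
-- name's slot, objects never move after creation, counts never change while synonyms
-- exist), so an object reference in a synonyms list / in `visited` is ported as the
-- object's name string, and a Name as its mutable payload (synonyms, count).
-- `graph[name] = Name(name, count)` inserts the fresh payload ([], count).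
def graphStepA (g : PySem.Dict String (List String × Int)) (e : String × String) :
    PySem.Dict String (List String × Int) :=
  let g := if g.contains e.1 then g else g.insert e.1 ([], 0)
  let g := if g.contains e.2 then g else g.insert e.2 ([], 0)
  let g := g.modify e.1 ([], 0) (fun v => (v.1 ++ [e.2], v.2))
  g.modify e.2 ([], 0) (fun v => (v.1 ++ [e.1], v.2))

-- dfs's unbounded recursion is made total with a fuel argument; the call site passes
-- graph.size + 1 and the proof shows the fuel is never exhausted.
def dfsA (g : PySem.Dict String (List String × Int)) :
    Nat → PySem.Set String → String → Int × PySem.Set String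
  | fuel, visited, root =>
    if PySem.Set.contains visited root then (0, visited)
    else
      match fuel with
      | 0 => (0, visited)
      | f + 1 =>
        let visited := PySem.Set.add visited root
        (g.getD root ([], 0)).1.foldl
          (fun (acc : Int × PySem.Set String) node =>
            let r := dfsA g f acc.2 node
            (acc.1 + r.1, r.2))
          ((g.getD root ([], 0)).2, visited)

def visitStepA (g : PySem.Dict String (List String × Int)) (fuel : Nat)
    (st : PySem.Set String × PySem.Dict String Int) (person : String) :
    PySem.Set String × PySem.Dict String Int :=
  if PySem.Set.contains st.1 person then st
  else
    let r := dfsA g fuel st.1 person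
    (r.2, st.2.insert person r.1)

def baby_names (names : List (String × Int)) (synonyms : List (String × String)) : List (String × Int) :=
  let graph := synonyms.foldl graphStepA
    (names.foldl (fun g p => g.insert p.1 ([], p.2)) PySem.Dict.empty)
  let st := graph.keys.foldl (visitStepA graph (graph.size + 1))
    (PySem.Set.empty, PySem.Dict.empty)
  st.2.keys.map (fun name => (name, st.2.getD name 0))

-- ===== PORT B =====
-- `for k in label: label[k] = ...` overwrites existing keys in place (order kept),
-- i.e. it maps the value of every item.
def mapValsB (d : PySem.Dict String String) (f : String → String) : PySem.Dict String String :=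
  PySem.Dict.mk (d.items.map (fun p => (p.1, f p.2)))

def synStepB (st : PySem.Dict String Int × PySem.Dict String String) (e : String × String) :
    PySem.Dict String Int × PySem.Dict String String :=
  let st := if st.1.contains e.1 then st else (st.1.insert e.1 0, st.2.insert e.1 e.1)
  let st := if st.1.contains e.2 then st else (st.1.insert e.2 0, st.2.insert e.2 e.2)
  let la := st.2.getD e.1 ""
  let lb := st.2.getD e.2 ""
  if la ≠ lb then (st.1, mapValsB st.2 (fun v => if v = lb then la else v)) else st

def groupStepB (counts : PySem.Dict String Int) (label : PySem.Dict String String)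
    (st : PySem.Dict String String × PySem.Dict String Int) (k : String) :
    PySem.Dict String String × PySem.Dict String Int :=
  let r := label.getD k ""
  let st := if st.1.contains r then st else (st.1.insert r k, st.2.insert k 0)
  (st.1, st.2.modify (st.1.getD r "") 0 (fun v => v + counts.getD k 0))

def baby_names_alt (names : List (String × Int)) (synonyms : List (String × String)) : List (String × Int) :=
  let counts := names.foldl (fun d p => d.insert p.1 p.2) PySem.Dict.empty
  let st := synonyms.foldl synStepB
    (counts, counts.keys.foldl (fun d n => d.insert n n) PySem.Dict.empty)
  let st2 := st.1.keys.foldl (groupStepB st.1 st.2) (PySem.Dict.empty, PySem.Dict.empty)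
  st2.2.items

-- ===== PRECONDITION & SPEC =====
def Spec_baby_names (names : List (String × Int)) (synonyms : List (String × String)) (out : List (String × Int)) : Prop := out = baby_names_alt names synonyms
instance (names : List (String × Int)) (synonyms : List (String × String)) (out : List (String × Int)) : Decidable (Spec_baby_names names synonyms out) := by unfold Spec_baby_names; infer_instance

-- ===== CLAIM (what is proved, stated in full; the proofs are below) =====
def Claim_equal_baby_names : Prop := ∀ (names : List (String × Int)) (synonyms : List (String × String)), Dom_baby_names names synonyms → Spec_baby_names names synonyms (baby_names names synonyms)

-- ===== LEMMAS AND PROOFS =====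

-- undirected edge relation of a synonym-pair list and its connectivity closure
def ER (es : List (String × String)) (u v : String) : Prop := (u, v) ∈ es ∨ (v, u) ∈ es
def Conn (es : List (String × String)) (u v : String) : Prop := Relation.ReflTransGen (ER es) u v

def adjOf (g : PySem.Dict String (List String × Int)) (x : String) : List String := (g.getD x ([], 0)).1
def cntOf (g : PySem.Dict String (List String × Int)) (x : String) : Int := (g.getD x ([], 0)).2
def lab (l : PySem.Dict String String) (x : String) : String := l.getD x ""

-- joint invariant of A's graph build and B's counts/label build over a prefix of edges
def BuildInv (es : List (String × String)) (g : PySem.Dict String (List String × Int))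
    (c : PySem.Dict String Int) (l : PySem.Dict String String) : Prop :=
  g.keys = c.keys ∧ l.keys = c.keys ∧ c.keys.Nodup ∧
  (∀ x, cntOf g x = c.getD x 0) ∧
  (∀ x y, y ∈ adjOf g x ↔ ER es x y) ∧
  (∀ e ∈ es, e.1 ∈ c.keys ∧ e.2 ∈ c.keys) ∧
  (∀ x ∈ c.keys, lab l x ∈ c.keys) ∧
  (∀ x y, x ∈ c.keys → y ∈ c.keys → (lab l x = lab l y ↔ Conn es x y))

theorem er_symm (es : List (String × String)) (u v : String) : ER es u v → ER es v u := by
  intro h; cases h with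
  | inl h => exact Or.inr h
  | inr h => exact Or.inl h

theorem conn_symm {es : List (String × String)} {u v : String} (h : Conn es u v) : Conn es v u :=
  Relation.ReflTransGen.symmetric (fun _ _ hh => er_symm es _ _ hh) h

theorem conn_trans {es : List (String × String)} {u v w : String}
    (h1 : Conn es u v) (h2 : Conn es v w) : Conn es u w := Relation.ReflTransGen.trans h1 h2

theorem conn_mono {es es' : List (String × String)} (hsub : ∀ e ∈ es, e ∈ es')
    {u v : String} (h : Conn es u v) : Conn es' u v := by
  refine Relation.ReflTransGen.mono ?_ h
  intro a b hab
  cases hab with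
  | inl h => exact Or.inl (hsub _ h)
  | inr h => exact Or.inr (hsub _ h)

theorem er_append_singleton (es : List (String × String)) (a b u v : String) :
    ER (es ++ [(a, b)]) u v ↔ ER es u v ∨ (u = a ∧ v = b) ∨ (u = b ∧ v = a) := by
  simp only [ER, List.mem_append, List.mem_singleton, Prod.ext_iff]
  tauto

theorem conn_append_singleton (es : List (String × String)) (a b x y : String) :
    Conn (es ++ [(a, b)]) x y ↔
      Conn es x y ∨ (Conn es x a ∧ Conn es b y) ∨ (Conn es x b ∧ Conn es a y) := by
  constructor
  · intro h
    induction h with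
    | refl => exact Or.inl Relation.ReflTransGen.refl
    | @tail m c h1 h2 ih =>
      rcases (er_append_singleton es a b m c).mp h2 with hstep | ⟨hma, hcb⟩ | ⟨hmb, hca⟩
      · rcases ih with hxy | ⟨hxa, hbm⟩ | ⟨hxb, ham⟩
        · exact Or.inl (hxy.tail hstep)
        · exact Or.inr (Or.inl ⟨hxa, hbm.tail hstep⟩)
        · exact Or.inr (Or.inr ⟨hxb, ham.tail hstep⟩)
      · subst hma; subst hcb
        rcases ih with hxy | ⟨hxa, hbm⟩ | ⟨hxb, ham⟩
        · exact Or.inr (Or.inl ⟨hxy, Relation.ReflTransGen.refl⟩)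
        · exact Or.inr (Or.inl ⟨hxa, Relation.ReflTransGen.refl⟩)
        · exact Or.inl hxb
      · subst hmb; subst hca
        rcases ih with hxy | ⟨hxa, hbm⟩ | ⟨hxb, ham⟩
        · exact Or.inr (Or.inr ⟨hxy, Relation.ReflTransGen.refl⟩)
        · exact Or.inl hxa
        · exact Or.inr (Or.inr ⟨hxb, Relation.ReflTransGen.refl⟩)
  · intro h
    have hedge : Conn (es ++ [(a, b)]) a b :=
      Relation.ReflTransGen.single (Or.inl (by simp))
    have hsub : ∀ e ∈ es, e ∈ es ++ [(a, b)] := fun e he => List.mem_append_left _ he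
    rcases h with hxy | ⟨hxa, hby⟩ | ⟨hxb, hay⟩
    · exact conn_mono hsub hxy
    · exact conn_trans (conn_trans (conn_mono hsub hxa) hedge) (conn_mono hsub hby)
    · exact conn_trans (conn_trans (conn_mono hsub hxb) (conn_symm hedge)) (conn_mono hsub hay)

theorem conn_of_not_mem (es : List (String × String)) (x y : String)
    (hx : ∀ e ∈ es, e.1 ≠ x ∧ e.2 ≠ x) : Conn es x y ↔ x = y := by
  constructor
  · intro h
    rcases Relation.ReflTransGen.cases_head h with rfl | ⟨m, hstep, _⟩
    · rfl
    · exfalso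
      cases hstep with
      | inl h => exact (hx _ h).1 rfl
      | inr h => exact (hx _ h).2 rfl
  · rintro rfl; exact Relation.ReflTransGen.refl

-- the names-loop builds equal key lists and counts
theorem namesFold_keys_cnt (names : List (String × Int)) :
    ∀ (g : PySem.Dict String (List String × Int)) (c : PySem.Dict String Int),
      g.keys = c.keys → (∀ x, cntOf g x = c.getD x 0) → (∀ x, adjOf g x = []) →
      (names.foldl (fun g p => g.insert p.1 ([], p.2)) g).keys
        = (names.foldl (fun d p => d.insert p.1 p.2) c).keys ∧
      (∀ x, cntOf (names.foldl (fun g p => g.insert p.1 ([], p.2)) g) x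
          = (names.foldl (fun d p => d.insert p.1 p.2) c).getD x 0) ∧
      (∀ x, adjOf (names.foldl (fun g p => g.insert p.1 ([], p.2)) g) x = []) := by
  induction names with
  | nil => intro g c h1 h2 h3; exact ⟨h1, h2, h3⟩
  | cons p rest ih =>
    intro g c h1 h2 h3
    refine ih _ _ ?_ ?_ ?_
    · rcases Bool.eq_false_or_eq_true (g.contains p.1) with hc | hc
      · rw [PySem.Dict.keys_insert_of_contains _ _ hc, PySem.Dict.keys_insert_of_contains, h1]
        rw [PySem.Dict.contains_eq_decide_mem_keys] at hc ⊢
        simpa [← h1] using hc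
      · rw [PySem.Dict.keys_insert_of_not_contains _ _ hc,
          PySem.Dict.keys_insert_of_not_contains, h1]
        rw [PySem.Dict.contains_eq_decide_mem_keys] at hc ⊢
        simpa [← h1] using hc

    · intro x
      simp only [cntOf, PySem.Dict.getD_insert]
      split
      · rfl
      · exact h2 x
    · intro x
      simp only [adjOf, PySem.Dict.getD_insert]
      split
      · rfl
      · exact h3 x

theorem getD_initLabel (ks : List String) :
    ∀ (d : PySem.Dict String String) (x : String),
      ((ks.foldl (fun d n => d.insert n n) d).getD x "") = (if x ∈ ks then x else d.getD x "") := by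
  induction ks with
  | nil => simp
  | cons k rest ih =>
    intro d x
    rw [List.foldl_cons, ih]
    by_cases hx : x ∈ rest
    · simp [hx]
    · by_cases hxk : x = k
      · subst hxk; simp [hx, PySem.Dict.getD_insert_self]
      · simp [hx, hxk, PySem.Dict.getD_insert_of_ne _ _ _ hxk]

theorem build_init (names : List (String × Int)) :
    BuildInv []
      (names.foldl (fun g p => g.insert p.1 ([], p.2)) PySem.Dict.empty)
      (names.foldl (fun d p => d.insert p.1 p.2) PySem.Dict.empty)
      ((names.foldl (fun d p => d.insert p.1 p.2) PySem.Dict.empty).keys.foldl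
        (fun d n => d.insert n n) PySem.Dict.empty) := by
  obtain ⟨hk, hc, ha⟩ := namesFold_keys_cnt names PySem.Dict.empty PySem.Dict.empty
    (by simp [PySem.Dict.keys_empty]) (by intro x; simp [cntOf, PySem.Dict.getD_empty])
    (by intro x; simp [adjOf, PySem.Dict.getD_empty])
  set c := names.foldl (fun d p => d.insert p.1 p.2) PySem.Dict.empty with hcdef
  have hnd : c.keys.Nodup := by
    apply PySem.Dict.nodup_keys_foldl_insert_key names (fun p => p.1)
      (fun d p => p.2) PySem.Dict.empty
    simp [PySem.Dict.keys_empty]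
  have hlkeys : (c.keys.foldl (fun d n => d.insert n n) PySem.Dict.empty).keys = c.keys := by
    rw [PySem.Dict.keys_foldl_insert c.keys (fun d n => n) PySem.Dict.empty]
    rw [PySem.Dict.keys_empty, PySem.Set.update_nil_left]
    exact PySem.Set.ofList_eq_self_of_nodup _ hnd
  have hlab : ∀ x ∈ c.keys, lab (c.keys.foldl (fun d n => d.insert n n) PySem.Dict.empty) x = x := by
    intro x hx
    rw [lab, getD_initLabel]
    simp [hx]
  refine ⟨hk, hlkeys, hnd, hc, ?_, by simp, ?_, ?_⟩
  · intro x y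
    simp [ha x, ER]
  · intro x hx
    rw [hlab x hx]; exact hx
  · intro x y hx hy
    rw [hlab x hx, hlab y hy, conn_of_not_mem _ _ _ (by simp)]

theorem mapValsB_keys (d : PySem.Dict String String) (f : String → String) :
    (mapValsB d f).keys = d.keys := by
  simp [mapValsB, PySem.Dict.keys, Function.comp]
theorem get?_mapValsB (d : PySem.Dict String String) (f : String → String) (x : String) :
    (mapValsB d f).get? x = (d.get? x).map f := by
  obtain ⟨items⟩ := d
  induction items with
  | nil => rfl
  | cons p rest ih =>
    obtain ⟨k, v⟩ := p
    simp only [mapValsB, List.map_cons, PySem.Dict.get?_mk_cons]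
    split
    · rfl
    · exact ih
theorem lab_mapValsB (d : PySem.Dict String String) (f : String → String) (x : String)
    (hx : x ∈ d.keys) : lab (mapValsB d f) x = f (lab d x) := by
  have h : d.get? x ≠ none := by
    intro hnone
    exact (PySem.Dict.get?_eq_none_iff_not_mem_keys d x).mp hnone hx
  obtain ⟨v, hv⟩ := Option.ne_none_iff_exists'.mp h
  simp [lab, PySem.Dict.getD_eq_get?_getD, get?_mapValsB, hv]

-- the "ensure key" half-step
theorem build_ensure (es : List (String × String)) (g : PySem.Dict String (List String × Int))
    (c : PySem.Dict String Int) (l : PySem.Dict String String) (k : String)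
    (h : BuildInv es g c l) :
    BuildInv es (if g.contains k then g else g.insert k ([], 0))
      (if c.contains k then c else c.insert k 0)
      (if c.contains k then l else l.insert k k) ∧
    k ∈ (if c.contains k then c else c.insert k 0).keys ∧
    g.contains k = c.contains k := by
  obtain ⟨hk, hl, hnd, hc, ha, he, hv, hiff⟩ := h
  have hgc : g.contains k = c.contains k := by
    rw [PySem.Dict.contains_eq_decide_mem_keys, PySem.Dict.contains_eq_decide_mem_keys, hk]
  rcases Bool.eq_false_or_eq_true (c.contains k) with hck | hck
  · have hgk : g.contains k = true := by rw [hgc]; exact hck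
    simp only [hgc, hck, if_true]
    refine ⟨⟨hk, hl, hnd, hc, ha, he, hv, hiff⟩, ?_, trivial⟩
    rw [PySem.Dict.contains_eq_decide_mem_keys] at hck; simpa using hck
  · -- fresh key
    have hkn : k ∉ c.keys := by
      rw [PySem.Dict.contains_eq_decide_mem_keys] at hck; simpa using hck
    have hknl : k ∉ l.keys := by rw [hl]; exact hkn
    have hkng : k ∉ g.keys := by rw [hk]; exact hkn
    have hknoedge : ∀ e ∈ es, e.1 ≠ k ∧ e.2 ≠ k := by
      intro e hee
      obtain ⟨h1, h2⟩ := he e hee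
      exact ⟨fun hh => hkn (hh ▸ h1), fun hh => hkn (hh ▸ h2)⟩
    simp only [hgc, hck, if_false, Bool.false_eq_true]
    have hckf : c.contains k = false := hck
    have hgkf : g.contains k = false := by rw [hgc]; exact hck
    have hlkf : l.contains k = false := by
      rw [PySem.Dict.contains_eq_decide_mem_keys]; simpa using hknl
    have hkeys' : (g.insert k ([], 0)).keys = (c.insert k 0).keys := by
      rw [PySem.Dict.keys_insert_of_not_contains _ _ hgkf,
        PySem.Dict.keys_insert_of_not_contains _ _ hckf, hk]
    have hckeys' : (c.insert k 0).keys = c.keys ++ [k] :=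
      PySem.Dict.keys_insert_of_not_contains _ _ hckf
    have hlkeys' : (l.insert k k).keys = (c.insert k 0).keys := by
      rw [PySem.Dict.keys_insert_of_not_contains _ _ hlkf,
        PySem.Dict.keys_insert_of_not_contains _ _ hckf, hl]
    have hmem' : ∀ x, x ∈ (c.insert k 0).keys ↔ (x ∈ c.keys ∨ x = k) := by
      intro x; rw [hckeys']; simp
    have hlab' : ∀ x, lab (l.insert k k) x = (if x = k then k else lab l x) := by
      intro x
      by_cases hxk : x = k
      · subst hxk; simp [lab, PySem.Dict.getD_insert_self]
      · simp [lab, hxk, PySem.Dict.getD_insert_of_ne _ _ _ hxk]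
    refine ⟨⟨hkeys', hlkeys', ?_, ?_, ?_, ?_, ?_, ?_⟩, ?_, trivial⟩
    · rw [hckeys']
      refine (List.nodup_append).mpr ⟨hnd, List.nodup_singleton k, ?_⟩
      intro a ha b hb hab
      have hbk : b = k := by simpa using hb
      exact hkn ((hab.trans hbk) ▸ ha)
    · intro x
      simp only [cntOf, PySem.Dict.getD_insert]
      split
      · rename_i hh; subst hh; rfl
      · exact hc x
    · intro x y
      have hadjeq : adjOf (g.insert k ([], 0)) x = adjOf g x := by
        simp only [adjOf, PySem.Dict.getD_insert]
        split
        · rename_i hh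
          rw [hh, PySem.Dict.getD_of_not_contains _ _ hgkf]
        · rfl
      rw [hadjeq]; exact ha x y
    · intro e hee
      obtain ⟨h1, h2⟩ := he e hee
      rw [hmem', hmem']; exact ⟨Or.inl h1, Or.inl h2⟩
    · intro x hx
      rw [hmem'] at hx ⊢
      rcases hx with hx | hx
      · rw [hlab' x, if_neg (show ¬ x = k from fun hh => hkn (hh ▸ hx))]
        exact Or.inl (hv x hx)
      · subst hx; rw [hlab' x, if_pos rfl]; exact Or.inr rfl
    · intro x y hx hy
      rw [hmem'] at hx hy
      rw [hlab' x, hlab' y]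
      have hconnk : ∀ z, Conn es k z ↔ k = z := fun z => conn_of_not_mem es k z hknoedge
      rcases hx with hx | hx
      · rcases hy with hy | hy
        · rw [if_neg (show ¬ x = k from fun hh => hkn (hh ▸ hx)),
            if_neg (show ¬ y = k from fun hh => hkn (hh ▸ hy))]
          exact hiff x y hx hy
        · rw [if_neg (show ¬ x = k from fun hh => hkn (hh ▸ hx)), if_pos hy, hy]
          constructor
          · intro hh; exact absurd (hh ▸ hv x hx) hkn
          · intro hh
            exact absurd ((hconnk x).mp (conn_symm hh)).symm (fun hh2 => hkn (hh2 ▸ hx))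
      · rw [if_pos hx, hx]
        rcases hy with hy | hy
        · rw [if_neg (show ¬ y = k from fun hh => hkn (hh ▸ hy))]
          constructor
          · intro hh; exact absurd (hh.symm ▸ hv y hy) hkn
          · intro hh; exact absurd ((hconnk y).mp hh) (fun hh2 => hkn (hh2 ▸ hy))
        · rw [if_pos hy, hy]
          exact iff_of_true rfl Relation.ReflTransGen.refl
    · rw [hmem']; exact Or.inr rfl
theorem adj_graphMod (g : PySem.Dict String (List String × Int)) (a b x y : String) :
    y ∈ adjOf ((g.modify a ([], 0) (fun v => (v.1 ++ [b], v.2))).modify b ([], 0)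
        (fun v => (v.1 ++ [a], v.2))) x ↔
      (y ∈ adjOf g x ∨ (x = a ∧ y = b) ∨ (x = b ∧ y = a)) := by
  by_cases hab : a = b
  · subst hab
    simp only [adjOf, PySem.Dict.getD_modify]
    by_cases hxa : x = a <;> simp [hxa, List.mem_append]
  · have hba : ¬ b = a := fun h => hab h.symm
    simp only [adjOf, PySem.Dict.getD_modify]
    by_cases hxb : x = b <;> by_cases hxa : x = a <;>
      simp [hxb, hxa, hab, hba, List.mem_append]
theorem cnt_graphMod (g : PySem.Dict String (List String × Int)) (a b x : String) :
    cntOf ((g.modify a ([], 0) (fun v => (v.1 ++ [b], v.2))).modify b ([], 0)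
        (fun v => (v.1 ++ [a], v.2))) x = cntOf g x := by
  by_cases hab : a = b
  · subst hab
    simp only [cntOf, PySem.Dict.getD_modify]
    by_cases hxa : x = a <;> simp [hxa]
  · have hba : ¬ b = a := fun h => hab h.symm
    simp only [cntOf, PySem.Dict.getD_modify]
    by_cases hxb : x = b <;> by_cases hxa : x = a <;> simp [hxb, hxa, hab, hba]
theorem keys_graphMod (g : PySem.Dict String (List String × Int)) (a b : String)
    (ha : a ∈ g.keys) (hb : b ∈ g.keys) :
    ((g.modify a ([], 0) (fun v => (v.1 ++ [b], v.2))).modify b ([], 0)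
        (fun v => (v.1 ++ [a], v.2))).keys = g.keys := by
  have hca : g.contains a = true := by
    rw [PySem.Dict.contains_eq_decide_mem_keys]; simpa using ha
  have h1 : (g.modify a ([], 0) (fun v => (v.1 ++ [b], v.2))).keys = g.keys := by
    rw [PySem.Dict.keys_modify, PySem.Dict.keys_insert_of_contains _ _ hca]
  have hcb : (g.modify a ([], 0) (fun v => (v.1 ++ [b], v.2))).contains b = true := by
    rw [PySem.Dict.contains_eq_decide_mem_keys, h1]; simpa using hb
  rw [PySem.Dict.keys_modify, PySem.Dict.keys_insert_of_contains _ _ hcb, h1]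
theorem build_merge (es : List (String × String)) (g : PySem.Dict String (List String × Int))
    (c : PySem.Dict String Int) (l : PySem.Dict String String) (a b : String)
    (h : BuildInv es g c l) (hain : a ∈ c.keys) (hbin : b ∈ c.keys) :
    BuildInv (es ++ [(a, b)])
      ((g.modify a ([], 0) (fun v => (v.1 ++ [b], v.2))).modify b ([], 0)
        (fun v => (v.1 ++ [a], v.2)))
      c
      (if lab l a ≠ lab l b then mapValsB l (fun v => if v = lab l b then lab l a else v)
        else l) := by
  obtain ⟨hk, hl, hnd, hc, ha, he, hv, hiff⟩ := h
  have haing : a ∈ g.keys := by rw [hk]; exact hain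
  have hbing : b ∈ g.keys := by rw [hk]; exact hbin
  have hainl : a ∈ l.keys := by rw [hl]; exact hain
  have hbinl : b ∈ l.keys := by rw [hl]; exact hbin
  have hkeys2 := keys_graphMod g a b haing hbing
  have hadj2 : ∀ x y, y ∈ adjOf ((g.modify a ([], 0) (fun v => (v.1 ++ [b], v.2))).modify b
      ([], 0) (fun v => (v.1 ++ [a], v.2))) x ↔ ER (es ++ [(a, b)]) x y := by
    intro x y
    rw [adj_graphMod, er_append_singleton, ha x y]
  by_cases hab : lab l a = lab l b
  · have hConnab : Conn es a b := (hiff a b hain hbin).mp hab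
    rw [if_neg (by simpa using hab)]
    refine ⟨hkeys2.trans hk, hl, hnd, ?_, hadj2, ?_, hv, ?_⟩
    · intro x; rw [cnt_graphMod]; exact hc x
    · intro e hee
      rcases List.mem_append.mp hee with hee | hee
      · exact he e hee
      · simp only [List.mem_singleton] at hee
        subst hee; exact ⟨hain, hbin⟩
    · intro x y hx hy
      rw [conn_append_singleton]
      constructor
      · intro hh; exact Or.inl ((hiff x y hx hy).mp hh)
      · intro hh
        refine (hiff x y hx hy).mpr ?_
        rcases hh with hh | ⟨h1, h2⟩ | ⟨h1, h2⟩
        · exact hh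
        · exact conn_trans (conn_trans h1 hConnab) h2
        · exact conn_trans (conn_trans h1 (conn_symm hConnab)) h2
  · have hnConnab : ¬ Conn es a b := fun hh => hab ((hiff a b hain hbin).mpr hh)
    rw [if_pos (by simpa using hab)]
    have hlab2 : ∀ x ∈ c.keys,
        lab (mapValsB l (fun v => if v = lab l b then lab l a else v)) x =
          (if lab l x = lab l b then lab l a else lab l x) := by
      intro x hx
      exact lab_mapValsB l _ x (by rw [hl]; exact hx)
    refine ⟨hkeys2.trans hk, (mapValsB_keys l _).trans hl, hnd, ?_, hadj2, ?_, ?_, ?_⟩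
    · intro x; rw [cnt_graphMod]; exact hc x
    · intro e hee
      rcases List.mem_append.mp hee with hee | hee
      · exact he e hee
      · simp only [List.mem_singleton] at hee
        subst hee; exact ⟨hain, hbin⟩
    · intro x hx
      rw [hlab2 x hx]
      split
      · exact hv a hain
      · exact hv x hx
    · intro x y hx hy
      rw [hlab2 x hx, hlab2 y hy, conn_append_singleton]
      have hCxb : lab l x = lab l b ↔ Conn es x b := hiff x b hx hbin
      have hCyb : lab l y = lab l b ↔ Conn es y b := hiff y b hy hbin
      by_cases hpx : lab l x = lab l b <;> by_cases hpy : lab l y = lab l b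
      · rw [if_pos hpx, if_pos hpy]
        exact iff_of_true rfl
          (Or.inl (conn_trans (hCxb.mp hpx) (conn_symm (hCyb.mp hpy))))
      · rw [if_pos hpx, if_neg hpy]
        constructor
        · intro hh
          exact Or.inr (Or.inr ⟨hCxb.mp hpx, conn_symm ((hiff y a hy hain).mp hh.symm)⟩)
        · intro hh
          rcases hh with hh | ⟨h1, h2⟩ | ⟨h1, h2⟩
          · exact absurd (hCyb.mpr (conn_trans (conn_symm hh) (hCxb.mp hpx))) hpy
          · exact absurd (hCyb.mpr (conn_symm h2)) hpy
          · exact ((hiff y a hy hain).mpr (conn_symm h2)).symm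
      · rw [if_pos hpy, if_neg hpx]
        constructor
        · intro hh
          exact Or.inr (Or.inl ⟨(hiff x a hx hain).mp hh, conn_symm (hCyb.mp hpy)⟩)
        · intro hh
          rcases hh with hh | ⟨h1, h2⟩ | ⟨h1, h2⟩
          · exact absurd (hCxb.mpr (conn_trans hh (hCyb.mp hpy))) hpx
          · exact (hiff x a hx hain).mpr h1
          · exact absurd (hCxb.mpr h1) hpx
      · rw [if_neg hpx, if_neg hpy]
        constructor
        · intro hh; exact Or.inl ((hiff x y hx hy).mp hh)
        · intro hh
          rcases hh with hh | ⟨h1, h2⟩ | ⟨h1, h2⟩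
          · exact (hiff x y hx hy).mpr hh
          · exact absurd (hCyb.mpr (conn_symm h2)) hpy
          · exact absurd (hCxb.mpr h1) hpx
theorem build_step_aux (es : List (String × String)) (a b : String)
    (g : PySem.Dict String (List String × Int)) (c : PySem.Dict String Int)
    (l : PySem.Dict String String) (h : BuildInv es g c l) (hm : a ∈ c.keys) :
    BuildInv (es ++ [(a, b)])
      (((if g.contains b then g else g.insert b ([], 0)).modify a ([], 0)
          (fun v => (v.1 ++ [b], v.2))).modify b ([], 0) (fun v => (v.1 ++ [a], v.2)))
      (if c.contains b then c else c.insert b 0)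
      (if (if c.contains b then l else l.insert b b).getD a "" ≠
          (if c.contains b then l else l.insert b b).getD b ""
        then mapValsB (if c.contains b then l else l.insert b b)
          (fun v => if v = (if c.contains b then l else l.insert b b).getD b ""
            then (if c.contains b then l else l.insert b b).getD a "" else v)
        else (if c.contains b then l else l.insert b b)) := by
  obtain ⟨h2, hm2, hgc2⟩ := build_ensure es g c l b h
  have hm1' : a ∈ (if c.contains b then c else c.insert b 0).keys := by
    split
    · exact hm
    · rename_i hh
      rw [PySem.Dict.keys_insert_of_not_contains _ _ (by simpa using hh)]
      exact List.mem_append_left _ hm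
  have hfin := build_merge es _ _ _ a b h2 hm1' hm2
  simpa [lab] using hfin
theorem build_step (es : List (String × String)) (e : String × String)
    (g : PySem.Dict String (List String × Int)) (c : PySem.Dict String Int)
    (l : PySem.Dict String String) (h : BuildInv es g c l) :
    BuildInv (es ++ [e]) (graphStepA g e) (synStepB (c, l) e).1 (synStepB (c, l) e).2 := by
  obtain ⟨ea, eb⟩ := e
  obtain ⟨h1, hm1, hgc1⟩ := build_ensure es g c l ea h
  have haux := build_step_aux es ea eb _ _ _ h1 hm1
  simp only [graphStepA, synStepB]
  rw [hgc1]
  rw [hgc1] at haux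
  rcases Bool.eq_false_or_eq_true (c.contains ea) with hc1 | hc1 <;>
    simp only [hc1, Bool.false_eq_true, if_false, if_true, ite_self,
      apply_ite Prod.fst, apply_ite Prod.snd] at haux ⊢ <;>
    exact haux
theorem build_fold (es₂ : List (String × String)) : ∀ (es₁ : List (String × String))
    (g : PySem.Dict String (List String × Int)) (c : PySem.Dict String Int)
    (l : PySem.Dict String String), BuildInv es₁ g c l →
    BuildInv (es₁ ++ es₂) (es₂.foldl graphStepA g)
      (es₂.foldl synStepB (c, l)).1 (es₂.foldl synStepB (c, l)).2 := by
  induction es₂ with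
  | nil => intro es₁ g c l h; simpa using h
  | cons e rest ih =>
    intro es₁ g c l h
    have h1 := build_step es₁ e g c l h
    have h2 := ih (es₁ ++ [e]) _ _ _ h1
    simpa [List.append_assoc] using h2

-- ===== the DFS lemma =====

-- dfs with shared visited set: monotone growth, soundness, closure, and the sum
def DfsPost (g : PySem.Dict String (List String × Int)) (vis : PySem.Set String)
    (root : String) (res : Int) (vis' : PySem.Set String) : Prop :=
  vis'.Nodup ∧ (∀ v ∈ vis, v ∈ vis') ∧ (∀ v ∈ vis', v ∈ g.keys) ∧ root ∈ vis' ∧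
  (∀ x ∈ vis', x ∉ vis → Relation.ReflTransGen (fun u v => v ∈ adjOf g u) root x) ∧
  (∀ y ∈ vis', y ∉ vis → ∀ z ∈ adjOf g y, z ∈ vis') ∧
  res = (∑ x ∈ vis'.toFinset, cntOf g x) - (∑ x ∈ vis.toFinset, cntOf g x)

theorem measure_antitone (keys : List String) (s t : PySem.Set String) (h : ∀ x ∈ s, x ∈ t) :
    (keys.filter (fun k => !(PySem.Set.contains t k))).length ≤
      (keys.filter (fun k => !(PySem.Set.contains s k))).length := by
  rw [← List.countP_eq_length_filter, ← List.countP_eq_length_filter]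
  apply List.countP_mono_left
  intro x _ hx
  simp only [Bool.not_eq_eq_eq_not, Bool.not_true, PySem.Set.contains_eq_listContains] at hx ⊢
  simp only [List.contains_eq_mem, decide_eq_false_iff_not] at hx ⊢
  exact fun hxs => hx (h x hxs)

theorem measure_decrease (keys : List String) (s : PySem.Set String) (root : String)
    (hr : root ∈ keys) (hnr : root ∉ s) :
    (keys.filter (fun k => !(PySem.Set.contains (s ++ [root]) k))).length <
      (keys.filter (fun k => !(PySem.Set.contains s k))).length := by
  have hfe : keys.filter (fun k => !(PySem.Set.contains (s ++ [root]) k)) =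
      (keys.filter (fun k => !(PySem.Set.contains s k))).filter (fun k => !(k == root)) := by
    rw [List.filter_filter]
    apply List.filter_congr
    intro a _
    simp only [PySem.Set.contains_eq_listContains, List.contains_eq_mem, List.mem_append,
      List.mem_singleton, beq_eq_decide]
    by_cases h1 : a ∈ s <;> by_cases h2 : a = root <;> simp [h1, h2]
  rw [hfe]
  apply List.length_filter_lt_length_iff_exists.mpr
  refine ⟨root, ?_, by simp⟩
  simp [hr, hnr]

theorem dfs_fold_aux (g : PySem.Dict String (List String × Int))
    (hadj : ∀ x y, y ∈ adjOf g x → x ∈ g.keys ∧ y ∈ g.keys) (f : Nat)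
    (ih : ∀ (vis : PySem.Set String) (root : String), vis.Nodup → (∀ v ∈ vis, v ∈ g.keys) →
      root ∈ g.keys → (g.keys.filter (fun k => !(PySem.Set.contains vis k))).length ≤ f →
      DfsPost g vis root (dfsA g f vis root).1 (dfsA g f vis root).2)
    (vis : PySem.Set String) (root : String) :
    ∀ (ns : List String), (∀ n ∈ ns, n ∈ adjOf g root) →
    ∀ (acc : Int) (visc : PySem.Set String),
      visc.Nodup → (∀ v ∈ visc, v ∈ g.keys) → (∀ v ∈ vis, v ∈ visc) → root ∈ visc →
      (∀ x ∈ visc, x ∉ vis → Relation.ReflTransGen (fun u v => v ∈ adjOf g u) root x) →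
      (∀ y ∈ visc, y ∉ vis → y ≠ root → ∀ z ∈ adjOf g y, z ∈ visc) →
      (g.keys.filter (fun k => !(PySem.Set.contains visc k))).length ≤ f →
      (ns.foldl (fun (acc : Int × PySem.Set String) node =>
          (acc.1 + (dfsA g f acc.2 node).1, (dfsA g f acc.2 node).2)) (acc, visc)).2.Nodup ∧
      (∀ v ∈ visc, v ∈ (ns.foldl (fun (acc : Int × PySem.Set String) node =>
          (acc.1 + (dfsA g f acc.2 node).1, (dfsA g f acc.2 node).2)) (acc, visc)).2) ∧
      (∀ v ∈ (ns.foldl (fun (acc : Int × PySem.Set String) node =>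
          (acc.1 + (dfsA g f acc.2 node).1, (dfsA g f acc.2 node).2)) (acc, visc)).2, v ∈ g.keys) ∧
      (∀ x ∈ (ns.foldl (fun (acc : Int × PySem.Set String) node =>
          (acc.1 + (dfsA g f acc.2 node).1, (dfsA g f acc.2 node).2)) (acc, visc)).2, x ∉ vis →
        Relation.ReflTransGen (fun u v => v ∈ adjOf g u) root x) ∧
      (∀ y ∈ (ns.foldl (fun (acc : Int × PySem.Set String) node =>
          (acc.1 + (dfsA g f acc.2 node).1, (dfsA g f acc.2 node).2)) (acc, visc)).2, y ∉ vis →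
        y ≠ root → ∀ z ∈ adjOf g y, z ∈ (ns.foldl (fun (acc : Int × PySem.Set String) node =>
          (acc.1 + (dfsA g f acc.2 node).1, (dfsA g f acc.2 node).2)) (acc, visc)).2) ∧
      (∀ n ∈ ns, n ∈ (ns.foldl (fun (acc : Int × PySem.Set String) node =>
          (acc.1 + (dfsA g f acc.2 node).1, (dfsA g f acc.2 node).2)) (acc, visc)).2) ∧
      (ns.foldl (fun (acc : Int × PySem.Set String) node =>
          (acc.1 + (dfsA g f acc.2 node).1, (dfsA g f acc.2 node).2)) (acc, visc)).1 =
        acc + ((∑ x ∈ (ns.foldl (fun (acc : Int × PySem.Set String) node =>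
          (acc.1 + (dfsA g f acc.2 node).1, (dfsA g f acc.2 node).2)) (acc, visc)).2.toFinset,
            cntOf g x) - (∑ x ∈ visc.toFinset, cntOf g x)) := by
  intro ns
  induction ns generalizing vis root with
  | nil =>
    intro _ acc visc h1 h2 h3 h4 h5 h6 _
    exact ⟨h1, fun v hv => hv, h2, h5, h6, by simp, by simp⟩
  | cons n rest ihn =>
    intro hns acc visc h1 h2 h3 h4 h5 h6 hfl
    have hnadj : n ∈ adjOf g root := hns n (List.mem_cons_self)
    have hnk : n ∈ g.keys := (hadj root n hnadj).2
    have post1 := ih visc n h1 h2 hnk hfl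
    obtain ⟨p1, p2, p3, pmem, psnd, pcls, psum⟩ := post1
    set vis1 := (dfsA g f visc n).2 with hvis1
    -- hypotheses at vis1
    have h2' : ∀ v ∈ vis1, v ∈ g.keys := p3
    have h3' : ∀ v ∈ vis, v ∈ vis1 := fun v hv => p2 v (h3 v hv)
    have h4' : root ∈ vis1 := p2 root h4
    have h5' : ∀ x ∈ vis1, x ∉ vis →
        Relation.ReflTransGen (fun u v => v ∈ adjOf g u) root x := by
      intro x hx hxv
      by_cases hxc : x ∈ visc
      · exact h5 x hxc hxv
      · exact Relation.ReflTransGen.head hnadj (psnd x hx hxc)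
    have h6' : ∀ y ∈ vis1, y ∉ vis → y ≠ root → ∀ z ∈ adjOf g y, z ∈ vis1 := by
      intro y hy hyv hyr z hz
      by_cases hyc : y ∈ visc
      · exact p2 z (h6 y hyc hyv hyr z hz)
      · exact pcls y hy hyc z hz
    have hfl' : (g.keys.filter (fun k => !(PySem.Set.contains vis1 k))).length ≤ f :=
      le_trans (measure_antitone g.keys visc vis1 p2) hfl
    have hrest := ihn vis root (fun n' hn' => hns n' (List.mem_cons_of_mem n hn'))
      (acc + (dfsA g f visc n).1) vis1 p1 h2' h3' h4' h5' h6' hfl'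
    -- `ihn` was stated generalizing vis root; instantiate at same vis root
    obtain ⟨q1, q2, q3, q4, q5, q6, q7⟩ := hrest
    simp only [List.foldl_cons]
    refine ⟨q1, fun v hv => q2 v (p2 v hv), q3, q4, q5, ?_, ?_⟩
    · intro m hm
      rcases List.mem_cons.mp hm with rfl | hm
      · exact q2 m pmem
      · exact q6 m hm
    · rw [q7, psum]
      ring

theorem dfsA_spec (g : PySem.Dict String (List String × Int))
    (hadj : ∀ x y, y ∈ adjOf g x → x ∈ g.keys ∧ y ∈ g.keys) :
    ∀ (fuel : Nat) (vis : PySem.Set String) (root : String),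
      vis.Nodup → (∀ v ∈ vis, v ∈ g.keys) → root ∈ g.keys →
      (g.keys.filter (fun k => !(PySem.Set.contains vis k))).length ≤ fuel →
      DfsPost g vis root (dfsA g fuel vis root).1 (dfsA g fuel vis root).2 := by
  intro fuel
  induction fuel with
  | zero =>
    intro vis root h1 h2 h3 hlen
    have hall : PySem.Set.contains vis root = true := by
      have h0 : (g.keys.filter (fun k => !(PySem.Set.contains vis k))).length = 0 :=
        Nat.le_zero.mp hlen
      have hnil := List.length_eq_zero_iff.mp h0
      have := List.filter_eq_nil_iff.mp hnil root h3
      simpa using this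
    have hrv : root ∈ vis := (PySem.Set.contains_iff vis root).mp hall
    rw [dfsA]
    simp only [hall, if_true]
    exact ⟨h1, fun v hv => hv, h2, hrv, fun x hx hxv => absurd hx hxv,
      fun y hy hyv => absurd hy hyv, by simp⟩
  | succ f ihf =>
    intro vis root h1 h2 h3 hlen
    rcases Bool.eq_false_or_eq_true (PySem.Set.contains vis root) with hcv | hcv
    · -- (whichever case is `true` ends up here or below; handle both)
      have hrv : root ∈ vis := (PySem.Set.contains_iff vis root).mp hcv
      rw [dfsA]
      simp only [hcv, if_true]
      exact ⟨h1, fun v hv => hv, h2, hrv, fun x hx hxv => absurd hx hxv,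
        fun y hy hyv => absurd hy hyv, by simp⟩
    · have hrv : root ∉ vis := by
        intro hm
        rw [← PySem.Set.contains_iff] at hm
        rw [hm] at hcv
        exact Bool.noConfusion hcv
      rw [dfsA]
      simp only [hcv, Bool.false_eq_true, if_false]
      rw [PySem.Set.add_of_not_mem hrv]
      have hndc : (vis ++ [root]).Nodup := by
        simp only [List.nodup_append, List.nodup_singleton, h1, true_and]
        intro a ha b hb hab
        simp only [List.mem_singleton] at hb
        exact hrv ((hab.trans hb) ▸ ha)
      have hkc : ∀ v ∈ vis ++ [root], v ∈ g.keys := by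
        intro v hv
        rcases List.mem_append.mp hv with hv | hv
        · exact h2 v hv
        · simp only [List.mem_singleton] at hv; subst hv; exact h3
      have hmeas : (g.keys.filter (fun k => !(PySem.Set.contains (vis ++ [root]) k))).length ≤ f := by
        have := measure_decrease g.keys vis root h3 hrv
        omega
      have haux := dfs_fold_aux g hadj f (fun v r => ihf v r) vis root
        ((g.getD root ([], 0)).1) (fun n hn => hn) ((g.getD root ([], 0)).2) (vis ++ [root])
        hndc hkc (fun v hv => List.mem_append_left _ hv) (by simp)
        (by
          intro x hx hxv
          rcases List.mem_append.mp hx with hx | hx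
          · exact absurd hx hxv
          · simp only [List.mem_singleton] at hx; subst hx; exact Relation.ReflTransGen.refl)
        (by
          intro y hy hyv hyr z hz
          rcases List.mem_append.mp hy with hy | hy
          · exact absurd hy hyv
          · simp only [List.mem_singleton] at hy; exact absurd hy hyr)
        hmeas
      obtain ⟨q1, q2, q3, q4, q5, q6, q7⟩ := haux
      have hsumc : (∑ x ∈ (vis ++ [root]).toFinset, cntOf g x)
          = cntOf g root + (∑ x ∈ vis.toFinset, cntOf g x) := by
        have hins : (vis ++ [root]).toFinset = insert root vis.toFinset := by
          simp [List.toFinset_append]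
        rw [hins, Finset.sum_insert (by simp [hrv])]
      refine ⟨q1, fun v hv => q2 v (List.mem_append_left _ hv), q3,
        q2 root (List.mem_append_right _ (by simp)), q4, ?_, ?_⟩
      · intro y hy hyv z hz
        by_cases hyr : y = root
        · subst hyr
          exact q6 z hz
        · exact q5 y hy hyv hyr z hz
      · have hc2 : (g.getD root ([], 0)).2 = cntOf g root := rfl
        rw [q7, hsumc, hc2]
        ring

-- ===== the grouping loop =====

def OuterInv (g : PySem.Dict String (List String × Int)) (lB : PySem.Dict String String)
    (_cB : PySem.Dict String Int) (p : List String)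
    (vis : PySem.Set String) (res : PySem.Dict String Int)
    (rep : PySem.Dict String String) (resB : PySem.Dict String Int) : Prop :=
  vis.Nodup ∧ (∀ v ∈ vis, v ∈ g.keys) ∧
  (∀ x, x ∈ vis ↔ (x ∈ g.keys ∧ ∃ k ∈ p, lab lB k = lab lB x)) ∧
  res.keys = resB.keys ∧ res.keys.Nodup ∧ (∀ r ∈ res.keys, r ∈ p) ∧
  (∀ r₁ ∈ res.keys, ∀ r₂ ∈ res.keys, lab lB r₁ = lab lB r₂ → r₁ = r₂) ∧
  (∀ k ∈ p, ∃ ρ ∈ res.keys, lab lB ρ = lab lB k) ∧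
  (∀ ρ ∈ res.keys, rep.getD (lab lB ρ) "" = ρ) ∧
  (∀ s, rep.contains s = true ↔ ∃ ρ ∈ res.keys, lab lB ρ = s) ∧
  (∀ ρ ∈ res.keys, res.getD ρ 0 =
    ∑ x ∈ g.keys.toFinset.filter (fun x => lab lB x = lab lB ρ), cntOf g x) ∧
  (∀ ρ ∈ res.keys, resB.getD ρ 0 =
    ∑ x ∈ p.toFinset.filter (fun x => lab lB x = lab lB ρ), cntOf g x)

theorem outer_fold (g : PySem.Dict String (List String × Int)) (lB : PySem.Dict String String)
    (cB : PySem.Dict String Int)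
    (hc : ∀ x, cntOf g x = cB.getD x 0)
    (hadj : ∀ x y, y ∈ adjOf g x → x ∈ g.keys ∧ y ∈ g.keys)
    (hnd : g.keys.Nodup)
    (hlabiff : ∀ x y, x ∈ g.keys → y ∈ g.keys →
      (lab lB x = lab lB y ↔ Relation.ReflTransGen (fun u v => v ∈ adjOf g u) x y)) :
    ∀ (rest p : List String), g.keys = p ++ rest →
      ∀ vis res rep resB, OuterInv g lB cB p vis res rep resB →
      OuterInv g lB cB (p ++ rest)
        (rest.foldl (visitStepA g (g.size + 1)) (vis, res)).1
        (rest.foldl (visitStepA g (g.size + 1)) (vis, res)).2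
        (rest.foldl (groupStepB cB lB) (rep, resB)).1
        (rest.foldl (groupStepB cB lB) (rep, resB)).2 := by
  intro rest
  induction rest with
  | nil =>
    intro p hK vis res rep resB h
    simpa using h
  | cons k rest ih =>
    intro p hK vis res rep resB h
    obtain ⟨i1, i2, i3, i4, i5, i6, i7, i8, i9, i10, i11, i12⟩ := h
    have hkK : k ∈ g.keys := by rw [hK]; exact List.mem_append_right _ (List.mem_cons_self)
    have hkp : k ∉ p := by
      rw [hK] at hnd
      intro hkp
      exact (List.disjoint_of_nodup_append hnd) hkp List.mem_cons_self
    -- the two branch conditions agree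
    have hcond : k ∈ vis ↔ rep.contains (lab lB k) = true := by
      rw [i3, i10]
      constructor
      · rintro ⟨_, k', hk'p, hk'⟩
        obtain ⟨ρ, hρ, hρl⟩ := i8 k' hk'p
        exact ⟨ρ, hρ, hρl.trans hk'⟩
      · rintro ⟨ρ, hρ, hρl⟩
        exact ⟨hkK, ρ, i6 ρ hρ, hρl⟩
    simp only [List.foldl_cons]
    by_cases hkv : k ∈ vis
    · -- already visited: A does nothing, B adds k's count to its representative
      have hcv : PySem.Set.contains vis k = true := (PySem.Set.contains_iff vis k).mpr hkv
      have hcr : rep.contains (lab lB k) = true := hcond.mp hkv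
      obtain ⟨ρ, hρmem, hρl⟩ := i10 (lab lB k) |>.mp hcr
      have hrepget : rep.getD (lab lB k) "" = ρ := by rw [← hρl]; exact i9 ρ hρmem
      have hstepA : visitStepA g (g.size + 1) (vis, res) k = (vis, res) := by
        simp only [visitStepA, hcv, if_true]
      have hcr' : rep.contains (lB.getD k "") = true := hcr
      have hrepget' : rep.getD (lB.getD k "") "" = ρ := hrepget
      have hstepB : groupStepB cB lB (rep, resB) k =
          (rep, resB.modify ρ 0 (fun v => v + cB.getD k 0)) := by
        simp only [groupStepB, hcr', if_true, hrepget']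
      rw [hstepA, hstepB]
      have hKassoc : g.keys = (p ++ [k]) ++ rest := by simpa [List.append_assoc] using hK
      have hnext : OuterInv g lB cB (p ++ [k]) vis res rep
          (resB.modify ρ 0 (fun v => v + cB.getD k 0)) := by
        have hρB : ρ ∈ resB.keys := i4 ▸ hρmem
        have hρBc : resB.contains ρ = true := by
          rw [PySem.Dict.contains_eq_decide_mem_keys]; simpa using hρB
        have hkeysB : (resB.modify ρ 0 (fun v => v + cB.getD k 0)).keys = resB.keys := by
          rw [PySem.Dict.keys_modify, PySem.Dict.keys_insert_of_contains _ _ hρBc]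
        refine ⟨i1, i2, ?_, i4.trans hkeysB.symm, i5, ?_, i7, ?_, i9, i10, i11, ?_⟩
        · intro x
          rw [i3]
          constructor
          · rintro ⟨hx, k', hk', hl⟩
            exact ⟨hx, k', List.mem_append_left _ hk', hl⟩
          · rintro ⟨hx, k', hk', hl⟩
            rcases List.mem_append.mp hk' with hk' | hk'
            · exact ⟨hx, k', hk', hl⟩
            · simp only [List.mem_singleton] at hk'
              rw [hk'] at hl
              obtain ⟨_, k'', hk'', hl''⟩ := i3 k |>.mp hkv
              exact ⟨hx, k'', hk'', hl''.trans hl⟩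
        · exact fun r hr => List.mem_append_left _ (i6 r hr)
        · intro k' hk'
          rcases List.mem_append.mp hk' with hk' | hk'
          · exact i8 k' hk'
          · simp only [List.mem_singleton] at hk'
            rw [hk']
            exact ⟨ρ, hρmem, hρl⟩
        · intro ρ' hρ'
          have hval : (resB.modify ρ 0 (fun v => v + cB.getD k 0)).getD ρ' 0 =
              if ρ' = ρ then resB.getD ρ 0 + cB.getD k 0 else resB.getD ρ' 0 := by
            rw [PySem.Dict.getD_modify]
          have hfs : (p ++ [k]).toFinset.filter (fun x => lab lB x = lab lB ρ') =
              if ρ' = ρ then insert k (p.toFinset.filter (fun x => lab lB x = lab lB ρ'))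
              else p.toFinset.filter (fun x => lab lB x = lab lB ρ') := by
            have hins : (p ++ [k]).toFinset = insert k p.toFinset := by
              simp [List.toFinset_append]
            rw [hins, Finset.filter_insert]
            split
            · rename_i heq
              rw [if_pos (i7 ρ' hρ' ρ hρmem (heq.symm.trans hρl.symm))]
            · rename_i hne2
              rw [if_neg]
              intro heq
              exact hne2 (by rw [heq]; exact hρl.symm)
          rw [hval, hfs]
          by_cases hcase : ρ' = ρ
          · rw [if_pos hcase, if_pos hcase, ← hcase,
              Finset.sum_insert (by simp [hkp]), i12 ρ' hρ', ← hc k]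
            ring
          · rw [if_neg hcase, if_neg hcase]
            exact i12 ρ' hρ'
      have := ih (p ++ [k]) hKassoc vis res rep _ hnext
      simpa [List.append_assoc] using this
    · -- fresh component: A runs dfs, B opens a new representative
      have hcv : PySem.Set.contains vis k = false := by
        rcases Bool.eq_false_or_eq_true (PySem.Set.contains vis k) with hcb | hcb
        · exact absurd ((PySem.Set.contains_iff vis k).mp hcb) hkv
        · exact hcb
      have hcr : rep.contains (lab lB k) = false := by
        rcases Bool.eq_false_or_eq_true (rep.contains (lab lB k)) with hcb | hcb
        · exact absurd (hcond.mpr hcb) hkv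
        · exact hcb
      have hszf : (g.keys.filter (fun x => !(PySem.Set.contains vis x))).length ≤ g.size + 1 := by
        have h1 := List.length_filter_le (fun x => !(PySem.Set.contains vis x)) g.keys
        have h2 : g.keys.length = g.size := by
          simp [PySem.Dict.keys, PySem.Dict.size]
        omega
      obtain ⟨q1, q2, q3, qmem, qsnd, qcls, qsum⟩ :=
        dfsA_spec g hadj (g.size + 1) vis k i1 i2 hkK hszf
      set s := (dfsA g (g.size + 1) vis k).1 with hs
      set vis' := (dfsA g (g.size + 1) vis k).2 with hvs
      have hnok : ∀ k' ∈ p, lab lB k' ≠ lab lB k := by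
        intro k' hk' hl
        exact hkv (i3 k |>.mpr ⟨hkK, k', hk', hl⟩)
      have hnoold : ∀ ρ ∈ res.keys, lab lB ρ ≠ lab lB k :=
        fun ρ hρ hl => hnok ρ (i6 ρ hρ) hl
      have hreach : ∀ z, Relation.ReflTransGen (fun u v => v ∈ adjOf g u) k z → z ∈ vis' := by
        intro z hz
        induction hz with
        | refl => exact qmem
        | @tail b c hkb hstep ihz =>
          refine qcls b ihz ?_ c hstep
          intro hbv
          have hbK : b ∈ g.keys := q3 b ihz
          have hlb : lab lB b = lab lB k := ((hlabiff k b hkK hbK).mpr hkb).symm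
          obtain ⟨_, k', hk', hlk'⟩ := i3 b |>.mp hbv
          exact hnok k' hk' (hlk'.trans hlb)
      have hvis' : ∀ x, x ∈ vis' ↔ (x ∈ vis ∨ (x ∈ g.keys ∧ lab lB x = lab lB k)) := by
        intro x
        constructor
        · intro hx
          by_cases hxv : x ∈ vis
          · exact Or.inl hxv
          · have hxK : x ∈ g.keys := q3 x hx
            exact Or.inr ⟨hxK, ((hlabiff k x hkK hxK).mpr (qsnd x hx hxv)).symm⟩
        · intro hx
          rcases hx with hx | ⟨hxK, hlx⟩
          · exact q2 x hx
          · exact hreach x ((hlabiff k x hkK hxK).mp hlx.symm)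
      have hdisj : Disjoint vis.toFinset
          (g.keys.toFinset.filter (fun x => lab lB x = lab lB k)) := by
        rw [Finset.disjoint_left]
        intro x hx hxC
        rw [List.mem_toFinset] at hx
        rw [Finset.mem_filter] at hxC
        obtain ⟨_, k', hk', hlk'⟩ := i3 x |>.mp hx
        exact hnok k' hk' (hlk'.trans hxC.2)
      have hfin : vis'.toFinset = vis.toFinset ∪
          (g.keys.toFinset.filter (fun x => lab lB x = lab lB k)) := by
        ext x
        simp only [List.mem_toFinset, Finset.mem_union, Finset.mem_filter]
        exact hvis' x
      have hsum : s = ∑ x ∈ g.keys.toFinset.filter (fun x => lab lB x = lab lB k), cntOf g x := by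
        rw [qsum, hfin, Finset.sum_union hdisj]
        ring
      -- reduce both step functions
      have hstepA : visitStepA g (g.size + 1) (vis, res) k = (vis', res.insert k s) := by
        simp only [visitStepA, hcv, Bool.false_eq_true, if_false]
        rw [← hs, ← hvs]
      have hcr' : rep.contains (lB.getD k "") = false := hcr
      have hstepB : groupStepB cB lB (rep, resB) k =
          (rep.insert (lab lB k) k,
            (resB.insert k 0).modify k 0 (fun v => v + cB.getD k 0)) := by
        simp only [groupStepB, hcr', Bool.false_eq_true, if_false]
        rw [show ((rep.insert (lB.getD k "") k, resB.insert k 0) :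
          PySem.Dict String String × PySem.Dict String Int).1.getD (lB.getD k "") "" =
            (rep.insert (lB.getD k "") k).getD (lB.getD k "") "" from rfl]
        rw [PySem.Dict.getD_insert_self]
        rfl
      rw [hstepA, hstepB]
      have hkres : k ∉ res.keys := fun hh => hkp (i6 k hh)
      have hkresB : k ∉ resB.keys := i4 ▸ hkres
      have hkresc : res.contains k = false := by
        rcases Bool.eq_false_or_eq_true (res.contains k) with hcb | hcb
        · exact absurd (by rw [PySem.Dict.contains_eq_decide_mem_keys] at hcb; simpa using hcb) hkres
        · exact hcb
      have hkresBc : resB.contains k = false := by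
        rcases Bool.eq_false_or_eq_true (resB.contains k) with hcb | hcb
        · exact absurd (by rw [PySem.Dict.contains_eq_decide_mem_keys] at hcb; simpa using hcb) hkresB
        · exact hcb
      have hreskeys : (res.insert k s).keys = res.keys ++ [k] :=
        PySem.Dict.keys_insert_of_not_contains _ _ hkresc
      have hkinsBc : (resB.insert k 0).contains k = true := PySem.Dict.contains_insert_self _ _ _
      have hresBkeys : ((resB.insert k 0).modify k 0 (fun v => v + cB.getD k 0)).keys
          = resB.keys ++ [k] := by
        rw [PySem.Dict.keys_modify, PySem.Dict.keys_insert_of_contains _ _ hkinsBc,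
          PySem.Dict.keys_insert_of_not_contains _ _ hkresBc]
      have hKassoc : g.keys = (p ++ [k]) ++ rest := by simpa [List.append_assoc] using hK
      have hnext : OuterInv g lB cB (p ++ [k]) vis' (res.insert k s)
          (rep.insert (lab lB k) k)
          ((resB.insert k 0).modify k 0 (fun v => v + cB.getD k 0)) := by
        refine ⟨q1, q3, ?_, ?_, ?_, ?_, ?_, ?_, ?_, ?_, ?_, ?_⟩
        · intro x
          rw [hvis', i3]
          constructor
          · intro hx
            rcases hx with ⟨hxK, k', hk', hl⟩ | ⟨hxK, hlx⟩
            · exact ⟨hxK, k', List.mem_append_left _ hk', hl⟩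
            · exact ⟨hxK, k, List.mem_append_right _ (by simp), hlx.symm⟩
          · rintro ⟨hxK, k', hk', hl⟩
            rcases List.mem_append.mp hk' with hk' | hk'
            · exact Or.inl ⟨hxK, k', hk', hl⟩
            · simp only [List.mem_singleton] at hk'
              rw [hk'] at hl
              exact Or.inr ⟨hxK, hl.symm⟩
        · rw [hreskeys, hresBkeys, i4]
        · rw [hreskeys]
          refine (List.nodup_append).mpr ⟨i5, List.nodup_singleton k, ?_⟩
          intro a ha b hb hab
          simp only [List.mem_singleton] at hb
          exact hkres ((hab.trans hb) ▸ ha)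
        · intro r hr
          rw [hreskeys] at hr
          rcases List.mem_append.mp hr with hr | hr
          · exact List.mem_append_left _ (i6 r hr)
          · exact List.mem_append_right _ hr
        · intro r1 hr1 r2 hr2 hl
          rw [hreskeys] at hr1 hr2
          rcases List.mem_append.mp hr1 with hr1 | hr1 <;>
            rcases List.mem_append.mp hr2 with hr2 | hr2
          · exact i7 r1 hr1 r2 hr2 hl
          · simp only [List.mem_singleton] at hr2
            rw [hr2] at hl
            exact absurd hl (hnoold r1 hr1)
          · simp only [List.mem_singleton] at hr1
            rw [hr1] at hl
            exact absurd hl.symm (hnoold r2 hr2)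
          · simp only [List.mem_singleton] at hr1 hr2
            exact hr1.trans hr2.symm
        · intro k' hk'
          rcases List.mem_append.mp hk' with hk' | hk'
          · obtain ⟨ρ, hρ, hρl⟩ := i8 k' hk'
            exact ⟨ρ, by rw [hreskeys]; exact List.mem_append_left _ hρ, hρl⟩
          · simp only [List.mem_singleton] at hk'
            exact ⟨k, by rw [hreskeys]; exact List.mem_append_right _ (by simp), by rw [hk']⟩
        · intro ρ hρ
          rw [hreskeys] at hρ
          rcases List.mem_append.mp hρ with hρ | hρ
          · rw [PySem.Dict.getD_insert_of_ne _ _ _ (hnoold ρ hρ)]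
            exact i9 ρ hρ
          · simp only [List.mem_singleton] at hρ
            rw [hρ, PySem.Dict.getD_insert_self]
        · intro str
          rw [PySem.Dict.contains_insert, hreskeys]
          constructor
          · intro hh
            rcases Bool.or_eq_true_iff.mp hh with hh | hh
            · refine ⟨k, List.mem_append_right _ (by simp), ?_⟩
              have : str = lab lB k := by simpa using hh
              exact this.symm
            · obtain ⟨ρ, hρ, hρl⟩ := (i10 str).mp hh
              exact ⟨ρ, List.mem_append_left _ hρ, hρl⟩
          · rintro ⟨ρ, hρ, hρl⟩
            rcases List.mem_append.mp hρ with hρ | hρ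
            · exact Bool.or_eq_true_iff.mpr (Or.inr ((i10 str).mpr ⟨ρ, hρ, hρl⟩))
            · simp only [List.mem_singleton] at hρ
              rw [hρ] at hρl
              exact Bool.or_eq_true_iff.mpr (Or.inl (by simpa using hρl.symm))
        · intro ρ hρ
          rw [hreskeys] at hρ
          rcases List.mem_append.mp hρ with hρ | hρ
          · rw [PySem.Dict.getD_insert_of_ne _ _ _
              (show ρ ≠ k from fun hh => hkres (hh ▸ hρ))]
            exact i11 ρ hρ
          · simp only [List.mem_singleton] at hρ
            rw [hρ, PySem.Dict.getD_insert_self]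
            exact hsum
        · intro ρ hρ
          rw [hreskeys] at hρ
          rcases List.mem_append.mp hρ with hρ | hρ
          · have hρk : ρ ≠ k := fun hh => hkres (hh ▸ hρ)
            rw [PySem.Dict.getD_modify_of_ne _ _ _ hρk,
              PySem.Dict.getD_insert_of_ne _ _ _ hρk]
            have hρresB : ρ ∈ resB.keys := i4 ▸ hρ
            have hfilt : (p ++ [k]).toFinset.filter (fun x => lab lB x = lab lB ρ) =
                p.toFinset.filter (fun x => lab lB x = lab lB ρ) := by
              have hins : (p ++ [k]).toFinset = insert k p.toFinset := by
                simp [List.toFinset_append]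
              rw [hins, Finset.filter_insert, if_neg]
              intro hh
              exact hnoold ρ hρ hh.symm
            rw [hfilt]
            exact i12 ρ hρ
          · simp only [List.mem_singleton] at hρ
            rw [hρ, PySem.Dict.getD_modify_self, PySem.Dict.getD_insert_self]
            have hfilt : (p ++ [k]).toFinset.filter (fun x => lab lB x = lab lB k) = {k} := by
              have hins : (p ++ [k]).toFinset = insert k p.toFinset := by
                simp [List.toFinset_append]
              rw [hins, Finset.filter_insert, if_pos rfl]
              have : p.toFinset.filter (fun x => lab lB x = lab lB k) = ∅ := by
                rw [Finset.filter_eq_empty_iff]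
                intro x hx
                exact hnok x (List.mem_toFinset.mp hx)
              rw [this]
              rfl
            rw [hfilt, Finset.sum_singleton, hc k]
            ring
      have := ih (p ++ [k]) hKassoc vis' (res.insert k s) (rep.insert (lab lB k) k) _ hnext
      simpa [List.append_assoc] using this

theorem rtg_iff_of_iff {r s : String → String → Prop} (h : ∀ a b, r a b ↔ s a b)
    (x y : String) : Relation.ReflTransGen r x y ↔ Relation.ReflTransGen s x y :=
  ⟨Relation.ReflTransGen.mono (fun a b => (h a b).mp),
    Relation.ReflTransGen.mono (fun a b => (h a b).mpr)⟩

-- ===== VERDICT (by name: the statement is the Claim_ definition above) =====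
theorem baby_names_spec : Claim_equal_baby_names := by
  unfold Claim_equal_baby_names
  intro names synonyms _dom
  unfold Spec_baby_names
  simp only [baby_names, baby_names_alt]
  have hinv := build_fold synonyms [] _ _ _ (build_init names)
  simp only [List.nil_append] at hinv
  obtain ⟨hk, hl, hndk, hcv, hav, hev, hvv, hiffv⟩ := hinv
  set g := synonyms.foldl graphStepA
    (names.foldl (fun g p => g.insert p.1 ([], p.2)) PySem.Dict.empty) with hgdef
  set st := synonyms.foldl synStepB
    (names.foldl (fun d p => d.insert p.1 p.2) PySem.Dict.empty,
      (names.foldl (fun d p => d.insert p.1 p.2) PySem.Dict.empty).keys.foldl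
        (fun d n => d.insert n n) PySem.Dict.empty) with hstdef
  have hadj : ∀ x y, y ∈ adjOf g x → x ∈ g.keys ∧ y ∈ g.keys := by
    intro x y hxy
    rcases (hav x y).mp hxy with he | he
    · obtain ⟨h1, h2⟩ := hev _ he
      exact ⟨hk ▸ h1, hk ▸ h2⟩
    · obtain ⟨h1, h2⟩ := hev _ he
      exact ⟨hk ▸ h2, hk ▸ h1⟩
  have hndg : g.keys.Nodup := hk ▸ hndk
  have hlabiff : ∀ x y, x ∈ g.keys → y ∈ g.keys →
      (lab st.2 x = lab st.2 y ↔ Relation.ReflTransGen (fun u v => v ∈ adjOf g u) x y) := by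
    intro x y hx hy
    rw [hiffv x y (hk ▸ hx) (hk ▸ hy)]
    exact (rtg_iff_of_iff (fun a b => (hav a b)) x y).symm
  have hbase : OuterInv g st.2 st.1 [] PySem.Set.empty PySem.Dict.empty
      PySem.Dict.empty PySem.Dict.empty := by
    refine ⟨List.nodup_nil, by simp [PySem.Set.empty], ?_, rfl, ?_, ?_, ?_, ?_, ?_, ?_, ?_, ?_⟩
    · intro x; simp [PySem.Set.empty]
    · simp [PySem.Dict.keys_empty]
    · simp [PySem.Dict.keys_empty]
    · simp [PySem.Dict.keys_empty]
    · simp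
    · simp [PySem.Dict.keys_empty]
    · intro s; simp [PySem.Dict.contains_empty, PySem.Dict.keys_empty]
    · simp [PySem.Dict.keys_empty]
    · simp [PySem.Dict.keys_empty]
  have hout := outer_fold g st.2 st.1 hcv hadj hndg hlabiff g.keys [] (by simp)
    PySem.Set.empty PySem.Dict.empty PySem.Dict.empty PySem.Dict.empty hbase
  simp only [List.nil_append] at hout
  obtain ⟨f1, f2, f3, f4, f5, f6, f7, f8, f9, f10, f11, f12⟩ := hout
  have hkeysB : st.1.keys = g.keys := hk.symm
  rw [hkeysB]
  have hndB : (g.keys.foldl (groupStepB st.1 st.2)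
      (PySem.Dict.empty, PySem.Dict.empty)).2.keys.Nodup := f4 ▸ f5
  rw [PySem.Dict.items_eq_map_keys _ hndB 0, ← f4]
  apply List.map_congr_left
  intro ρ hρ
  have hval := (f11 ρ hρ).trans (f12 ρ (f4 ▸ hρ)).symm
  rw [hval]
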